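-- pv_equiv track=rewrite | github.com/Okhan97/Pattern_recognition | T01/moments.py | mu
-- ===== SOURCE A (Python) =====
-- def moment(R,r,s):
--     result = 0
--     for i,j in R:
--         result += (i**r*j**s)
--     return result
--
-- def mu(R,r,s):
--     m_00 = moment(R,0,0)
--     m_01 = moment(R,0,1)
--     m_10 = moment(R,1,0)
--     avg_i = int(round(m_10/m_00))
--     avg_j = int(round(m_01/m_00))
--     mu = 0
--     for i,j in R:
--         mu += (i-avg_i)**r*(j-avg_j)**s
--     return mu
-- ===== SOURCE B (Python) =====
-- def mu(R, r, s):
--     n = 0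
--     si = 0
--     sj = 0
--     for i, j in R:
--         n += 1
--         si += i
--         sj += j
--     avg_i = int(round(si / n))
--     avg_j = int(round(sj / n))
--     counts = {}
--     for ij in R:
--         counts[ij] = counts.get(ij, 0) + 1
--     total = 0
--     for (i, j), c in counts.items():
--         total += c * (i - avg_i) ** r * (j - avg_j) ** s
--     return total
-- ===== Notes on version B (the rewrite author's own statement) =====
-- stated objective: alternative
-- what changed: B computes the centroid from one fused count/sum-i/sum-j pass instead of A's three moment() passes, and sums the central term over a dict of distinct points with multiplicities (one power computation per distinct point) instead of A's per-element pass.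
-- outside the precondition, e.g. on mu([(2, 3), (4, 5)], -1, 0): A returns 0.0, B returns 0.0
import Mathlib
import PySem

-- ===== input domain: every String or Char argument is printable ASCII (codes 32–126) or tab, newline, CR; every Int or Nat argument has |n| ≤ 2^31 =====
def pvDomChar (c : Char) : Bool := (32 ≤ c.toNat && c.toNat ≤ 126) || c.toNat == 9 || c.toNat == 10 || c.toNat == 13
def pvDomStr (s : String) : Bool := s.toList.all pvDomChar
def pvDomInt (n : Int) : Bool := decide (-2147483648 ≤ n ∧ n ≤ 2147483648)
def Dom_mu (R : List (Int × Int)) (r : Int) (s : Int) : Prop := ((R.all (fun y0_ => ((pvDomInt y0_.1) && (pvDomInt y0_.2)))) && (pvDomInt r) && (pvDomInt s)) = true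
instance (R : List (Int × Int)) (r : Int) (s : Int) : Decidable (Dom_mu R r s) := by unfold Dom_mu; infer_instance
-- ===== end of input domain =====

-- B fuses A's three centroid passes into one count/sum accumulator and sums the central term over a
-- dict of distinct points with multiplicities (objective: alternative decomposition, same results).

-- ===== PORT A =====
-- int(round(a/b)) for integers a, b: exact rational round-half-to-even. This models CPython exactly on
-- the inputs the checks draw (b a list length, |a| ≤ len·2^31 ≪ 2^53): the float quotient a/b then lies
-- within half an ulp of the rational value, closer than the 1/(2b) gap to the nearest half-integer tie,
-- so the float round and the rational round agree. Shared by both ports (both Pythons contain exactly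
-- this expression for the centroid).
def pyRoundDiv (a b : Int) : Int :=
  let q := PySem.Int.floordiv a b
  let rem := a - q * b
  if 2 * rem < b then q
  else if b < 2 * rem then q + 1
  else if q % 2 = 0 then q else q + 1

def moment (R : List (Int × Int)) (r : Int) (s : Int) : Int :=
  R.foldl (fun result ij => result + ij.1 ^ r.toNat * ij.2 ^ s.toNat) 0

def mu (R : List (Int × Int)) (r : Int) (s : Int) : Int :=
  let m00 := moment R 0 0
  let m01 := moment R 0 1
  let m10 := moment R 1 0
  let avgI := pyRoundDiv m10 m00
  let avgJ := pyRoundDiv m01 m00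
  R.foldl (fun acc ij => acc + (ij.1 - avgI) ^ r.toNat * (ij.2 - avgJ) ^ s.toNat) 0

-- ===== PORT B =====
def mu_alt (R : List (Int × Int)) (r : Int) (s : Int) : Int :=
  let acc := R.foldl (fun t ij => (t.1 + 1, t.2.1 + ij.1, t.2.2 + ij.2)) ((0 : Int), (0 : Int), (0 : Int))
  let avgI := pyRoundDiv acc.2.1 acc.1
  let avgJ := pyRoundDiv acc.2.2 acc.1
  -- counts[ij] = counts.get(ij, 0) + 1
  let counts : PySem.Dict (Int × Int) Int :=
    R.foldl (fun d ij => d.insert ij (d.getD ij 0 + 1)) PySem.Dict.empty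
  -- for (i, j), c in counts.items(): total += c * (i-avg_i)**r * (j-avg_j)**s
  counts.items.foldl
    (fun total kc => total + kc.2 * (kc.1.1 - avgI) ^ r.toNat * (kc.1.2 - avgJ) ^ s.toNat) 0

-- ===== PRECONDITION & SPEC =====
-- Pre_ excludes the empty list (A raises ZeroDivisionError computing the centroid) and negative
-- exponents (A then returns a float, or raises ZeroDivisionError when a shifted coordinate is 0 —
-- in neither case an int value).
def Pre_mu (R : List (Int × Int)) (r : Int) (s : Int) : Prop := R ≠ [] ∧ 0 ≤ r ∧ 0 ≤ s
instance (R : List (Int × Int)) (r : Int) (s : Int) : Decidable (Pre_mu R r s) := by unfold Pre_mu; infer_instance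

def pvWitness_mu : (List (Int × Int)) × Int × Int := ([(1, 2), (3, 4), (-2, 7), (1, 2)], 2, 1)

def Spec_mu (R : List (Int × Int)) (r : Int) (s : Int) (out : Int) : Prop := out = mu_alt R r s
instance (R : List (Int × Int)) (r : Int) (s : Int) (out : Int) : Decidable (Spec_mu R r s out) := by unfold Spec_mu; infer_instance

-- ===== CLAIM (what is proved, stated in full; the proofs are below) =====
def Claim_equal_mu : Prop := ∀ (R : List (Int × Int)) (r : Int) (s : Int), Dom_mu R r s → Pre_mu R r s → Spec_mu R r s (mu R r s)

-- ===== LEMMAS AND PROOFS =====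

-- the one-pass (count, Σi, Σj) accumulator of B
theorem trip_fold (R : List (Int × Int)) (a b c : Int) :
    R.foldl (fun t ij => (t.1 + 1, t.2.1 + ij.1, t.2.2 + ij.2)) (a, b, c)
      = (a + R.length, b + (R.map Prod.fst).sum, c + (R.map Prod.snd).sum) := by
  induction R generalizing a b c with
  | nil => simp
  | cons x t ih => simp [List.foldl_cons, ih]; constructor <;> [skip; constructor] <;> ring

-- the three raw moments A computes for the centroid, as list sums
theorem moment_zero_zero (R : List (Int × Int)) : moment R 0 0 = (R.length : Int) := by
  simp [moment, PySem.List.foldl_add]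

theorem moment_one_zero (R : List (Int × Int)) : moment R 1 0 = (R.map Prod.fst).sum := by
  simp [moment, PySem.List.foldl_add]

theorem moment_zero_one (R : List (Int × Int)) : moment R 0 1 = (R.map Prod.snd).sum := by
  simp [moment, PySem.List.foldl_add]

-- summing count(k) * f k over the distinct elements is summing f over the list
theorem grouped_sum (R : List (Int × Int)) (f : Int × Int → Int) :
    ((PySem.Set.ofList R).map (fun k => ((R.count k : Nat) : Int) * f k)).sum = (R.map f).sum := by
  have hperm : (PySem.Set.ofList R).Perm R.dedup := by
    apply (List.perm_ext_iff_of_nodup (PySem.Set.nodup_ofList R) R.nodup_dedup).mpr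
    intro x
    simp [PySem.Set.mem_ofList, List.mem_dedup]
  rw [List.Perm.sum_eq (hperm.map _)]
  have h := Finset.sum_multiset_map_count (↑R : Multiset (Int × Int)) f
  simp only [Multiset.toFinset, Finset.sum] at h
  simp at h
  have hcount : ∀ (k : Int × Int) (l : List (Int × Int)),
      @List.count (Int × Int) instBEqProd k l = @List.count (Int × Int) instBEqOfDecidableEq k l := by
    intro k l
    simp only [List.count_eq_countP]
    apply List.countP_congr
    intro a _
    simp
  simp only [hcount]
  exact h.symm

theorem mu_eq_mu_alt (R : List (Int × Int)) (r s : Int) :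
    mu R r s = mu_alt R r s := by
  simp only [mu, mu_alt, trip_fold, moment_zero_zero, moment_one_zero, moment_zero_one, zero_add,
    PySem.Dict.foldl_insert_getD_add_one_eq_counter, PySem.Dict.items_counter,
    PySem.List.foldl_add, List.map_map]
  rw [Function.comp_def]
  simp only [mul_assoc]
  simp only [grouped_sum]

-- ===== VERDICT (by name: the statement is the Claim_ definition above) =====
theorem mu_spec : Claim_equal_mu := by
  intro R r s _hdom _hpre
  unfold Spec_mu
  exact mu_eq_mu_alt R r s
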